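-- pv_equiv track=rewrite | github.com/Drelios/Hairpin_Checker | hairpin.py | nussinov_jacobson_dna
-- ===== SOURCE A (Python) =====
-- def nussinov_jacobson_dna(sequence):
--     n = len(sequence)
--     matrix = [[0] * n for _ in range(n)]
--
--     for length in range(1, n):
--         for i in range(n - length):
--             j = i + length
--
--             # Case 1: Pairing between i and j
--             if (sequence[i] == 'A' and sequence[j] == 'T') or (sequence[i] == 'T' and sequence[j] == 'A') or \
--                (sequence[i] == 'G' and sequence[j] == 'C') or (sequence[i] == 'C' and sequence[j] == 'G'):
--                 matrix[i][j] = matrix[i + 1][j - 1] + 1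
--
--             # Case 2: Pairing between i and k, and between k+1 and j (where i <= k < j)
--             for k in range(i, j):
--                 matrix[i][j] = max(matrix[i][j], matrix[i][k] + matrix[k + 1][j])
--
--     return matrix, sequence
-- ===== SOURCE B (Python) =====
-- def nussinov_jacobson_dna(sequence):
--     # Top-down memoized recursion over subintervals instead of A's bottom-up
--     # length-by-length table fill; the matrix is produced at the end from solve.
--     n = len(sequence)
--     pairs = {('A', 'T'), ('T', 'A'), ('G', 'C'), ('C', 'G')}
--     memo = {}
--
--     def solve(i, j):
--         if j <= i:
--             return 0
--         if (i, j) in memo: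
--             return memo[(i, j)]
--         best = solve(i + 1, j - 1) + 1 if (sequence[i], sequence[j]) in pairs else 0
--         for k in range(i, j):
--             c = solve(i, k) + solve(k + 1, j)
--             if best < c:
--                 best = c
--         memo[(i, j)] = best
--         return best
--
--     matrix = [[solve(i, j) for j in range(n)] for i in range(n)]
--     return matrix, sequence
-- ===== Notes on version B (the rewrite author's own statement) =====
-- stated objective: alternative
-- what changed: Replaces A's iterative bottom-up length-by-length fill of a preallocated matrix by a top-down memoized recursion solve(i,j) over subintervals (a dict cache), with the matrix produced afterwards by querying solve for every cell.
import Mathlib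
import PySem

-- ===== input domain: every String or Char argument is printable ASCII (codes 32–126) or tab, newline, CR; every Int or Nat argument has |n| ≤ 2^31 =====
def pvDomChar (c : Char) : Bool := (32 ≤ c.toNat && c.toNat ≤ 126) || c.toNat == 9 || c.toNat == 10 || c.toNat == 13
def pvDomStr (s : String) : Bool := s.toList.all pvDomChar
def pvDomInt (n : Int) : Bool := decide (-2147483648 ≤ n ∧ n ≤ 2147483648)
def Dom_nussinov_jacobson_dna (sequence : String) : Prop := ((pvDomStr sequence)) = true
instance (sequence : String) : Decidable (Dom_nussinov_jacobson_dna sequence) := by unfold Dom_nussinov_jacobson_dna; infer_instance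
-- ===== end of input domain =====

-- B replaces A's iterative bottom-up length-by-length table fill by a top-down memoized
-- recursion solve(i,j) over subintervals, the matrix being produced afterwards by querying
-- solve for every cell (objective: alternative decomposition, same O(n^3) cost).

-- ===== PORT A =====
-- matrix[i][j] read (indices here are Nat values produced by range, hence nonnegative and in range)
def get2 (m : List (List Int)) (i j : Nat) : Int := (m.getD i []).getD j 0
-- matrix[i][j] = v
def set2 (m : List (List Int)) (i j : Nat) (v : Int) : List (List Int) :=
  m.set i ((m.getD i []).set j v)

-- literal port of A; Python range(a,b) over nonnegative bounds is List.range' a (b-a) / List.range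
def nussinov_jacobson_dna (sequence : String) : List (List Int) × String :=
  let cs := sequence.toList
  let n := cs.length
  let matrix : List (List Int) := List.replicate n (List.replicate n 0)
  let matrix := (List.range' 1 (n - 1)).foldl (fun matrix length =>
    (List.range (n - length)).foldl (fun matrix i =>
      let j := i + length
      -- Case 1: pairing between i and j
      let matrix :=
        if (cs.getD i ' ' == 'A' && cs.getD j ' ' == 'T') ||
           (cs.getD i ' ' == 'T' && cs.getD j ' ' == 'A') ||
           (cs.getD i ' ' == 'G' && cs.getD j ' ' == 'C') ||
           (cs.getD i ' ' == 'C' && cs.getD j ' ' == 'G') then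
          set2 matrix i j (get2 matrix (i + 1) (j - 1) + 1)
        else matrix
      -- Case 2: bifurcation over k in range(i, j)
      (List.range' i (j - i)).foldl (fun matrix k =>
        set2 matrix i j (max (get2 matrix i j) (get2 matrix i k + get2 matrix (k + 1) j)))
        matrix) matrix) matrix
  (matrix, sequence)

-- ===== PORT B =====
-- literal port of Source B: top-down memoized recursion; the memo dict is threaded through the
-- recursion as explicit state, fuel bounds the recursion depth (any fuel ≥ j - i suffices)
def pairsB : List (Char × Char) := [('A', 'T'), ('T', 'A'), ('G', 'C'), ('C', 'G')]

def solveB (cs : List Char) :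
    Nat → PySem.Dict (Nat × Nat) Int → Nat → Nat → Int × PySem.Dict (Nat × Nat) Int
  | 0, memo, _, _ => (0, memo)
  | f + 1, memo, i, j =>
    if j ≤ i then (0, memo)
    else
      match memo.get? (i, j) with
      | some v => (v, memo)
      | none =>
        let p0 :=
          if pairsB.contains (cs.getD i ' ', cs.getD j ' ') then
            let r := solveB cs f memo (i + 1) (j - 1)
            (r.1 + 1, r.2)
          else (0, memo)
        let p := (List.range' i (j - i)).foldl
          (fun (p : Int × PySem.Dict (Nat × Nat) Int) k =>
            let r1 := solveB cs f p.2 i k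
            let r2 := solveB cs f r1.2 (k + 1) j
            let c := r1.1 + r2.1
            (if p.1 < c then c else p.1, r2.2)) p0
        (p.1, p.2.insert (i, j) p.1)

def nussinov_jacobson_dna_alt (sequence : String) : List (List Int) × String :=
  let cs := sequence.toList
  let n := cs.length
  let res := (List.range n).foldl
    (fun (acc : List (List Int) × PySem.Dict (Nat × Nat) Int) i =>
      let rm := (List.range n).foldl
        (fun (acc2 : List Int × PySem.Dict (Nat × Nat) Int) j =>
          let r := solveB cs n acc2.2 i j
          (acc2.1 ++ [r.1], r.2)) ([], acc.2)
      (acc.1 ++ [rm.1], rm.2)) ([], PySem.Dict.empty)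
  (res.1, sequence)

-- ===== PRECONDITION & SPEC =====
def Spec_nussinov_jacobson_dna (sequence : String) (out : List (List Int) × String) : Prop := out = nussinov_jacobson_dna_alt sequence
instance (sequence : String) (out : List (List Int) × String) : Decidable (Spec_nussinov_jacobson_dna sequence out) := by unfold Spec_nussinov_jacobson_dna; infer_instance

-- ===== CLAIM (what is proved, stated in full; the proofs are below) =====
def Claim_equal_nussinov_jacobson_dna : Prop := ∀ (sequence : String), Dom_nussinov_jacobson_dna sequence → Spec_nussinov_jacobson_dna sequence (nussinov_jacobson_dna sequence)

-- ===== LEMMAS AND PROOFS =====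

def pairAt (cs : List Char) (i j : Nat) : Bool :=
  (cs.getD i ' ' == 'A' && cs.getD j ' ' == 'T') ||
  (cs.getD i ' ' == 'T' && cs.getD j ' ' == 'A') ||
  (cs.getD i ' ' == 'G' && cs.getD j ' ' == 'C') ||
  (cs.getD i ' ' == 'C' && cs.getD j ' ' == 'G')

def Nf (cs : List Char) : Nat → Nat → Nat → Int
  | 0, _, _ => 0
  | f + 1, i, j =>
    if j ≤ i then 0 else
      (List.range' i (j - i)).foldl
        (fun b k => max b (Nf cs f i k + Nf cs f (k + 1) j))
        (if pairAt cs i j then Nf cs f (i + 1) (j - 1) + 1 else 0)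

def Nv (cs : List Char) (i j : Nat) : Int := Nf cs (j - i) i j

theorem Nf_fuel (cs : List Char) : ∀ (f i j : Nat), j - i ≤ f → Nf cs (f + 1) i j = Nf cs f i j := by
  intro f
  induction f with
  | zero =>
    intro i j h
    have hji : j ≤ i := by omega
    simp [Nf, hji]
  | succ f ih =>
    intro i j h
    by_cases hji : j ≤ i
    · simp [Nf, hji]
    · rw [Nat.not_le] at hji
      have l1 : Nf cs (f + 1 + 1) i j = if j ≤ i then 0 else
          (List.range' i (j - i)).foldl
            (fun b k => max b (Nf cs (f + 1) i k + Nf cs (f + 1) (k + 1) j))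
            (if pairAt cs i j then Nf cs (f + 1) (i + 1) (j - 1) + 1 else 0) := rfl
      have l2 : Nf cs (f + 1) i j = if j ≤ i then 0 else
          (List.range' i (j - i)).foldl
            (fun b k => max b (Nf cs f i k + Nf cs f (k + 1) j))
            (if pairAt cs i j then Nf cs f (i + 1) (j - 1) + 1 else 0) := rfl
      rw [l1, l2, if_neg (by omega : ¬ j ≤ i), if_neg (by omega : ¬ j ≤ i)]
      have hbase : (if pairAt cs i j then Nf cs (f + 1) (i + 1) (j - 1) + 1 else 0)
          = (if pairAt cs i j then Nf cs f (i + 1) (j - 1) + 1 else 0) := by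
        rw [ih (i + 1) (j - 1) (by omega)]
      rw [hbase]
      apply PySem.List.foldl_congr_mem
      intro b k hk
      have hk' := List.mem_range'.mp hk
      rw [ih i k (by omega), ih (k + 1) j (by omega)]

theorem Nf_eq_Nv (cs : List Char) (f i j : Nat) (h : j - i ≤ f) : Nf cs f i j = Nv cs i j := by
  unfold Nv
  obtain ⟨d, rfl⟩ : ∃ d, f = (j - i) + d := ⟨f - (j - i), by omega⟩
  clear h
  induction d with
  | zero => rfl
  | succ d ih => rw [← ih, show j - i + (d + 1) = (j - i + d) + 1 by ring, Nf_fuel cs _ _ _ (by omega)]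

theorem Nv_zero (cs : List Char) (i j : Nat) (h : j ≤ i) : Nv cs i j = 0 := by
  unfold Nv
  have : j - i = 0 := by omega
  rw [this]
  rfl

theorem Nv_eq (cs : List Char) (i j : Nat) (h : i < j) :
    Nv cs i j =
      (List.range' i (j - i)).foldl
        (fun b k => max b (Nv cs i k + Nv cs (k + 1) j))
        (if pairAt cs i j then Nv cs (i + 1) (j - 1) + 1 else 0) := by
  obtain ⟨d, hd⟩ : ∃ d, j - i = d + 1 := ⟨j - i - 1, by omega⟩
  have l1 : Nf cs (d + 1) i j = (List.range' i (j - i)).foldl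
      (fun b k => max b (Nf cs d i k + Nf cs d (k + 1) j))
      (if pairAt cs i j then Nf cs d (i + 1) (j - 1) + 1 else 0) := by
    show (if j ≤ i then 0 else _) = _
    rw [if_neg (by omega : ¬ j ≤ i)]
  have h0 : Nv cs i j = Nf cs (d + 1) i j := by unfold Nv; rw [hd]
  have hbase : (if pairAt cs i j then Nf cs d (i + 1) (j - 1) + 1 else 0)
      = (if pairAt cs i j then Nv cs (i + 1) (j - 1) + 1 else 0) := by
    rw [Nf_eq_Nv cs d (i + 1) (j - 1) (by omega)]
  rw [h0, l1, hbase]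
  apply PySem.List.foldl_congr_mem
  intro b k hk
  have hk' := List.mem_range'.mp hk
  have hkj : k < j := by omega
  rw [Nf_eq_Nv cs d i k (by omega), Nf_eq_Nv cs d (k + 1) j (by omega)]

def matF (n : Nat) (g : Nat → Nat → Int) : List (List Int) :=
  (List.range n).map (fun i => (List.range n).map (fun j => g i j))

def upd (g : Nat → Nat → Int) (i j : Nat) (v : Int) : Nat → Nat → Int :=
  fun a b => if a = i ∧ b = j then v else g a b

theorem getD_map_range {α : Type} (f : Nat → α) (n i : Nat) (d : α) :
    ((List.range n).map f).getD i d = if i < n then f i else d := by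
  by_cases hi : i < n
  · rw [List.getD_eq_getElem?_getD, List.getElem?_map, List.getElem?_range hi]
    simp [hi]
  · rw [List.getD_eq_getElem?_getD, List.getElem?_map,
      List.getElem?_eq_none_iff.mpr (by simpa using hi)]
    simp [hi]

theorem get2_matF (n : Nat) (g : Nat → Nat → Int) (i j : Nat) :
    get2 (matF n g) i j = if i < n ∧ j < n then g i j else 0 := by
  unfold get2 matF
  rw [getD_map_range]
  by_cases hi : i < n
  · rw [if_pos hi, getD_map_range]
    by_cases hj : j < n
    · simp [hi, hj]
    · simp [hi, hj]
  · simp [hi]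

theorem matF_congr (n : Nat) (g g' : Nat → Nat → Int)
    (h : ∀ a b, a < n → b < n → g a b = g' a b) : matF n g = matF n g' := by
  unfold matF
  apply List.map_congr_left
  intro a ha
  apply List.map_congr_left
  intro b hb
  exact h a b (List.mem_range.mp ha) (List.mem_range.mp hb)

theorem set2_matF (n : Nat) (g : Nat → Nat → Int) (i j : Nat) (v : Int)
    (hi : i < n) (hj : j < n) :
    set2 (matF n g) i j v = matF n (upd g i j v) := by
  unfold set2 matF upd
  rw [getD_map_range, if_pos hi]
  apply List.ext_getElem (by simp)
  intro a h1 h2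
  simp only [List.getElem_set, List.getElem_map, List.getElem_range]
  by_cases hai : i = a
  · rw [if_pos hai]
    subst hai
    apply List.ext_getElem (by simp)
    intro b h3 h4
    simp only [List.getElem_set, List.getElem_map, List.getElem_range]
    by_cases hbj : j = b
    · subst hbj
      rw [if_pos rfl, if_pos (by tauto)]
    · rw [if_neg hbj, if_neg (by tauto)]
  · rw [if_neg hai]
    apply List.ext_getElem (by simp)
    intro b h3 h4
    simp only [List.getElem_map, List.getElem_range]
    rw [if_neg (by tauto)]

theorem replicate_eq_map_range {α : Type} (n : Nat) (x : α) :
    List.replicate n x = (List.range n).map (fun _ => x) := by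
  rw [List.map_const', List.length_range]

def gA (cs : List Char) (L m : Nat) : Nat → Nat → Int :=
  fun a b => if b - a < L ∨ (b - a = L ∧ a < m) then Nv cs a b else 0

theorem upd_upd (g : Nat → Nat → Int) (i j : Nat) (v w : Int) (n : Nat) :
    matF n (upd (upd g i j v) i j w) = matF n (upd g i j w) := by
  apply matF_congr
  intro a b _ _
  by_cases hab : a = i ∧ b = j <;> simp [upd, hab]

theorem kfold (cs : List Char) (n : Nat) (g : Nat → Nat → Int) (i j : Nat)
    (hi : i < n) (hj : j < n)
    (hg1 : ∀ k, k < j → g i k = Nv cs i k)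
    (hg2 : ∀ k, i ≤ k → g (k + 1) j = Nv cs (k + 1) j) :
    ∀ (ks : List Nat) (acc : Int), (∀ k ∈ ks, i ≤ k ∧ k < j) →
      ks.foldl (fun matrix k =>
          set2 matrix i j (max (get2 matrix i j) (get2 matrix i k + get2 matrix (k + 1) j)))
        (matF n (upd g i j acc))
      = matF n (upd g i j (ks.foldl (fun b k => max b (Nv cs i k + Nv cs (k + 1) j)) acc)) := by
  intro ks
  induction ks with
  | nil => intro acc _; rfl
  | cons k ks ih =>
    intro acc hmem
    obtain ⟨hik, hkj⟩ := hmem k List.mem_cons_self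
    simp only [List.foldl_cons]
    have e1 : get2 (matF n (upd g i j acc)) i j = acc := by
      rw [get2_matF, if_pos ⟨hi, hj⟩]; simp [upd]
    have e2 : get2 (matF n (upd g i j acc)) i k = Nv cs i k := by
      rw [get2_matF, if_pos ⟨hi, by omega⟩]
      unfold upd
      rw [if_neg (by omega : ¬ (i = i ∧ k = j))]
      exact hg1 k hkj
    have e3 : get2 (matF n (upd g i j acc)) (k + 1) j = Nv cs (k + 1) j := by
      rw [get2_matF, if_pos ⟨by omega, hj⟩]
      unfold upd
      rw [if_neg (by omega : ¬ (k + 1 = i ∧ j = j))]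
      exact hg2 k hik
    rw [e1, e2, e3, set2_matF n _ i j _ hi hj, upd_upd]
    exact ih _ (fun x hx => hmem x (List.mem_cons_of_mem _ hx))

theorem cellA (cs : List Char) (n L M : Nat) (hL : 1 ≤ L) (hM : M < n - L) :
    (List.range' M (M + L - M)).foldl (fun matrix k =>
        set2 matrix M (M + L)
          (max (get2 matrix M (M + L)) (get2 matrix M k + get2 matrix (k + 1) (M + L))))
      (if (cs.getD M ' ' == 'A' && cs.getD (M + L) ' ' == 'T') ||
          (cs.getD M ' ' == 'T' && cs.getD (M + L) ' ' == 'A') ||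
          (cs.getD M ' ' == 'G' && cs.getD (M + L) ' ' == 'C') ||
          (cs.getD M ' ' == 'C' && cs.getD (M + L) ' ' == 'G') then
         set2 (matF n (gA cs L M)) M (M + L)
           (get2 (matF n (gA cs L M)) (M + 1) (M + L - 1) + 1)
       else matF n (gA cs L M))
    = matF n (gA cs L (M + 1)) := by
  have hMn : M < n := by omega
  have hjn : M + L < n := by omega
  have hstep1 :
      (if (cs.getD M ' ' == 'A' && cs.getD (M + L) ' ' == 'T') ||
          (cs.getD M ' ' == 'T' && cs.getD (M + L) ' ' == 'A') ||
          (cs.getD M ' ' == 'G' && cs.getD (M + L) ' ' == 'C') ||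
          (cs.getD M ' ' == 'C' && cs.getD (M + L) ' ' == 'G') then
         set2 (matF n (gA cs L M)) M (M + L)
           (get2 (matF n (gA cs L M)) (M + 1) (M + L - 1) + 1)
       else matF n (gA cs L M))
      = matF n (upd (gA cs L M) M (M + L)
          (if pairAt cs M (M + L) then Nv cs (M + 1) (M + L - 1) + 1 else 0)) := by
    rw [show ((cs.getD M ' ' == 'A' && cs.getD (M + L) ' ' == 'T') ||
          (cs.getD M ' ' == 'T' && cs.getD (M + L) ' ' == 'A') ||
          (cs.getD M ' ' == 'G' && cs.getD (M + L) ' ' == 'C') ||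
          (cs.getD M ' ' == 'C' && cs.getD (M + L) ' ' == 'G')) = pairAt cs M (M + L) from rfl]
    by_cases hp : pairAt cs M (M + L)
    · rw [if_pos hp, if_pos hp]
      have hread : get2 (matF n (gA cs L M)) (M + 1) (M + L - 1) = Nv cs (M + 1) (M + L - 1) := by
        rw [get2_matF, if_pos ⟨by omega, by omega⟩]
        unfold gA
        rw [if_pos (by omega)]
      rw [hread, set2_matF n _ _ _ _ hMn hjn]
    · rw [if_neg hp, if_neg hp]
      apply matF_congr
      intro a b _ _
      unfold upd gA
      by_cases hab : a = M ∧ b = M + L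
      · obtain ⟨rfl, rfl⟩ := hab
        rw [if_neg (by omega : ¬ (a + L - a < L ∨ (a + L - a = L ∧ a < a))), if_pos (by tauto)]
      · rw [if_neg hab]
  rw [hstep1]
  rw [kfold cs n (gA cs L M) M (M + L) hMn hjn
    (fun k hk => by unfold gA; rw [if_pos (Or.inl (by omega))])
    (fun k hk => by unfold gA; rw [if_pos (Or.inl (by omega))])
    (List.range' M (M + L - M)) _
    (fun k hk => by
      have := List.mem_range'.mp hk
      omega)]
  have hNv := Nv_eq cs M (M + L) (by omega)
  rw [← hNv]
  apply matF_congr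
  intro a b _ _
  unfold upd gA
  by_cases hab : a = M ∧ b = M + L
  · obtain ⟨rfl, rfl⟩ := hab
    rw [if_pos (by tauto), if_pos (Or.inr (by omega))]
  · rw [if_neg hab]
    by_cases hc : b - a < L ∨ (b - a = L ∧ a < M)
    · rcases hc with hc | hc
      · rw [if_pos (Or.inl hc), if_pos (Or.inl hc)]
      · rw [if_pos (Or.inr hc), if_pos (Or.inr ⟨hc.1, by omega⟩)]
    · rw [if_neg hc, if_neg (by
        intro hc2
        rcases hc2 with h | ⟨h1, h2⟩
        · exact hc (Or.inl h)
        · have ha : a = M ∨ a < M := by omega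
          rcases ha with rfl | h3
          · exact hab ⟨rfl, by omega⟩
          · exact hc (Or.inr ⟨h1, h3⟩))]

theorem innerA (cs : List Char) (n L : Nat) (hL : 1 ≤ L) :
    ∀ (M : Nat), M ≤ n - L →
    (List.range M).foldl (fun matrix i =>
        (List.range' i (i + L - i)).foldl (fun matrix k =>
          set2 matrix i (i + L)
            (max (get2 matrix i (i + L)) (get2 matrix i k + get2 matrix (k + 1) (i + L))))
          (if (cs.getD i ' ' == 'A' && cs.getD (i + L) ' ' == 'T') ||
              (cs.getD i ' ' == 'T' && cs.getD (i + L) ' ' == 'A') ||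
              (cs.getD i ' ' == 'G' && cs.getD (i + L) ' ' == 'C') ||
              (cs.getD i ' ' == 'C' && cs.getD (i + L) ' ' == 'G') then
             set2 matrix i (i + L) (get2 matrix (i + 1) (i + L - 1) + 1)
           else matrix))
      (matF n (gA cs L 0))
    = matF n (gA cs L M) := by
  intro M
  induction M with
  | zero => intro _; rfl
  | succ M ih =>
    intro hM
    rw [List.range_succ, List.foldl_append, ih (by omega)]
    simp only [List.foldl_cons, List.foldl_nil]
    exact cellA cs n L M hL (by omega)

theorem outerA (cs : List Char) (n : Nat) :
    ∀ (t : Nat), t ≤ n - 1 →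
    (List.range' 1 t).foldl (fun matrix length =>
        (List.range (n - length)).foldl (fun matrix i =>
          (List.range' i (i + length - i)).foldl (fun matrix k =>
            set2 matrix i (i + length)
              (max (get2 matrix i (i + length))
                (get2 matrix i k + get2 matrix (k + 1) (i + length))))
            (if (cs.getD i ' ' == 'A' && cs.getD (i + length) ' ' == 'T') ||
                (cs.getD i ' ' == 'T' && cs.getD (i + length) ' ' == 'A') ||
                (cs.getD i ' ' == 'G' && cs.getD (i + length) ' ' == 'C') ||
                (cs.getD i ' ' == 'C' && cs.getD (i + length) ' ' == 'G') then
               set2 matrix i (i + length) (get2 matrix (i + 1) (i + length - 1) + 1)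
             else matrix))
          matrix)
      (matF n (gA cs 1 0))
    = matF n (gA cs (1 + t) 0) := by
  intro t
  induction t with
  | zero => intro _; rfl
  | succ t ih =>
    intro ht
    rw [List.range'_concat, List.foldl_append, ih (by omega)]
    simp only [List.foldl_cons, List.foldl_nil, Nat.one_mul]
    rw [innerA cs n (1 + t) (by omega) (n - (1 + t)) (le_refl _)]
    apply matF_congr
    intro a b ha hb
    unfold gA
    by_cases hc : b - a < 1 + t ∨ (b - a = 1 + t ∧ a < n - (1 + t))
    · rw [if_pos hc, if_pos (by rcases hc with h | ⟨h1, h2⟩ <;> omega)]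
    · rw [if_neg hc, if_neg (by
        intro h2
        rcases h2 with h | ⟨h1, h2⟩
        · apply hc
          by_cases hlt : b - a < 1 + t
          · exact Or.inl hlt
          · right
            constructor
            · omega
            · omega
        · omega)]

theorem portA_eval (sequence : String) :
    nussinov_jacobson_dna sequence
      = (matF sequence.toList.length (fun a b => Nv sequence.toList a b), sequence) := by
  have hdef : nussinov_jacobson_dna sequence =
      ((List.range' 1 (sequence.toList.length - 1)).foldl (fun matrix length =>
        (List.range (sequence.toList.length - length)).foldl (fun matrix i =>
          (List.range' i (i + length - i)).foldl (fun matrix k =>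
            set2 matrix i (i + length)
              (max (get2 matrix i (i + length))
                (get2 matrix i k + get2 matrix (k + 1) (i + length))))
            (if (sequence.toList.getD i ' ' == 'A' && sequence.toList.getD (i + length) ' ' == 'T') ||
                (sequence.toList.getD i ' ' == 'T' && sequence.toList.getD (i + length) ' ' == 'A') ||
                (sequence.toList.getD i ' ' == 'G' && sequence.toList.getD (i + length) ' ' == 'C') ||
                (sequence.toList.getD i ' ' == 'C' && sequence.toList.getD (i + length) ' ' == 'G') then
               set2 matrix i (i + length) (get2 matrix (i + 1) (i + length - 1) + 1)
             else matrix))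
          matrix)
        (List.replicate sequence.toList.length (List.replicate sequence.toList.length 0)),
       sequence) := rfl
  rw [hdef]
  have hrep : List.replicate sequence.toList.length (List.replicate sequence.toList.length (0 : Int))
      = matF sequence.toList.length (gA sequence.toList 1 0) := by
    unfold matF
    rw [replicate_eq_map_range]
    apply List.map_congr_left
    intro a _
    rw [replicate_eq_map_range]
    apply List.map_congr_left
    intro b _
    unfold gA
    by_cases hc : b - a < 1 ∨ (b - a = 1 ∧ a < 0)
    · rw [if_pos hc, Nv_zero _ _ _ (by omega)]
    · rw [if_neg hc]
  rw [hrep, outerA sequence.toList sequence.toList.length (sequence.toList.length - 1) (le_refl _)]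
  have : matF sequence.toList.length (gA sequence.toList (1 + (sequence.toList.length - 1)) 0)
      = matF sequence.toList.length (fun a b => Nv sequence.toList a b) := by
    apply matF_congr
    intro a b ha hb
    unfold gA
    rw [if_pos (Or.inl (by omega))]
  rw [this]

-- ===== B-side lemmas =====

theorem contains_pairsB (cs : List Char) (i j : Nat) :
    pairsB.contains (cs.getD i ' ', cs.getD j ' ') = pairAt cs i j := by
  unfold pairsB pairAt
  simp only [List.contains_cons, List.contains_nil, Bool.or_false, Bool.or_assoc]
  rfl

theorem if_lt_max (b c : Int) : (if b < c then c else b) = max b c := by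
  rw [max_def]
  split_ifs <;> omega

-- memo invariant: every stored value is the Nussinov value of its key
def InvM (cs : List Char) (memo : PySem.Dict (Nat × Nat) Int) : Prop :=
  ∀ a b v, memo.get? (a, b) = some v → v = Nv cs a b

theorem InvM_empty (cs : List Char) : InvM cs PySem.Dict.empty := by
  intro a b v h
  rw [PySem.Dict.get?_empty] at h
  exact absurd h (by simp)

theorem InvM_insert (cs : List Char) (memo : PySem.Dict (Nat × Nat) Int) (i j : Nat) (v : Int)
    (hInv : InvM cs memo) (hv : v = Nv cs i j) : InvM cs (memo.insert (i, j) v) := by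
  intro a b w h
  rw [PySem.Dict.get?_insert] at h
  by_cases hab : (a, b) = ((i, j) : Nat × Nat)
  · rw [if_pos hab] at h
    obtain ⟨rfl, rfl⟩ := Prod.mk.injEq .. ▸ hab
    cases h
    exact hv
  · rw [if_neg hab] at h
    exact hInv a b w h

theorem solveB_correct (cs : List Char) :
    ∀ (f : Nat) (memo : PySem.Dict (Nat × Nat) Int) (i j : Nat),
      InvM cs memo → j - i ≤ f →
      (solveB cs f memo i j).1 = Nv cs i j ∧ InvM cs (solveB cs f memo i j).2 := by
  intro f
  induction f with
  | zero =>
    intro memo i j hInv h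
    have hji : j ≤ i := by omega
    exact ⟨(Nv_zero cs i j hji).symm, hInv⟩
  | succ f ih =>
    intro memo i j hInv h
    by_cases hji : j ≤ i
    · simp only [solveB, if_pos hji]
      exact ⟨(Nv_zero cs i j hji).symm, hInv⟩
    · rw [Nat.not_le] at hji
      simp only [solveB, if_neg (by omega : ¬ j ≤ i)]
      cases hget : memo.get? (i, j) with
      | some v => exact ⟨hInv i j v hget, hInv⟩
      | none =>
        -- base value p0
        have hbase :
            ((if pairsB.contains (cs.getD i ' ', cs.getD j ' ') then
                let r := solveB cs f memo (i + 1) (j - 1)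
                (r.1 + 1, r.2)
              else ((0 : Int), memo)) :
              Int × PySem.Dict (Nat × Nat) Int).1
              = (if pairAt cs i j then Nv cs (i + 1) (j - 1) + 1 else 0)
            ∧ InvM cs ((if pairsB.contains (cs.getD i ' ', cs.getD j ' ') then
                let r := solveB cs f memo (i + 1) (j - 1)
                (r.1 + 1, r.2)
              else ((0 : Int), memo)) :
              Int × PySem.Dict (Nat × Nat) Int).2 := by
          rw [contains_pairsB]
          by_cases hp : pairAt cs i j
          · rw [if_pos hp, if_pos hp]
            obtain ⟨h1, h2⟩ := ih memo (i + 1) (j - 1) hInv (by omega)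
            exact ⟨by simp [h1], h2⟩
          · rw [if_neg hp, if_neg hp]
            exact ⟨rfl, hInv⟩
        set p0 := ((if pairsB.contains (cs.getD i ' ', cs.getD j ' ') then
                let r := solveB cs f memo (i + 1) (j - 1)
                (r.1 + 1, r.2)
              else ((0 : Int), memo)) :
              Int × PySem.Dict (Nat × Nat) Int) with hp0
        -- the k-fold
        have hfold : ∀ (ks : List Nat), (∀ k ∈ ks, i ≤ k ∧ k < j) →
            ∀ (acc : Int × PySem.Dict (Nat × Nat) Int), InvM cs acc.2 →
            (ks.foldl (fun (p : Int × PySem.Dict (Nat × Nat) Int) k =>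
                let r1 := solveB cs f p.2 i k
                let r2 := solveB cs f r1.2 (k + 1) j
                let c := r1.1 + r2.1
                (if p.1 < c then c else p.1, r2.2)) acc).1
              = ks.foldl (fun b k => max b (Nv cs i k + Nv cs (k + 1) j)) acc.1
            ∧ InvM cs (ks.foldl (fun (p : Int × PySem.Dict (Nat × Nat) Int) k =>
                let r1 := solveB cs f p.2 i k
                let r2 := solveB cs f r1.2 (k + 1) j
                let c := r1.1 + r2.1
                (if p.1 < c then c else p.1, r2.2)) acc).2 := by
          intro ks
          induction ks with
          | nil => intro _ acc hacc; exact ⟨rfl, hacc⟩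
          | cons k ks ihk =>
            intro hmem acc hacc
            obtain ⟨hik, hkj⟩ := hmem k List.mem_cons_self
            simp only [List.foldl_cons]
            obtain ⟨e1, hI1⟩ := ih acc.2 i k hacc (by omega)
            obtain ⟨e2, hI2⟩ := ih (solveB cs f acc.2 i k).2 (k + 1) j hI1 (by omega)
            rw [e1, e2, if_lt_max]
            exact ihk (fun x hx => hmem x (List.mem_cons_of_mem _ hx)) _ hI2
        obtain ⟨hb1, hb2⟩ := hbase
        obtain ⟨hf1, hf2⟩ := hfold (List.range' i (j - i))
          (fun k hk => by have := List.mem_range'.mp hk; omega) p0 hb2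
        have hval :
            ((List.range' i (j - i)).foldl (fun (p : Int × PySem.Dict (Nat × Nat) Int) k =>
                let r1 := solveB cs f p.2 i k
                let r2 := solveB cs f r1.2 (k + 1) j
                let c := r1.1 + r2.1
                (if p.1 < c then c else p.1, r2.2)) p0).1 = Nv cs i j := by
          rw [hf1, hb1, ← Nv_eq cs i j hji]
        exact ⟨hval, InvM_insert cs _ i j _ hf2 hval⟩

theorem rowB (cs : List Char) (n i : Nat) :
    ∀ (T : Nat), T ≤ n →
    ∀ (row0 : List Int) (memo : PySem.Dict (Nat × Nat) Int), InvM cs memo →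
    ((List.range T).foldl (fun (acc2 : List Int × PySem.Dict (Nat × Nat) Int) j =>
        let r := solveB cs n acc2.2 i j
        (acc2.1 ++ [r.1], r.2)) (row0, memo)).1
      = row0 ++ (List.range T).map (fun j => Nv cs i j)
    ∧ InvM cs ((List.range T).foldl (fun (acc2 : List Int × PySem.Dict (Nat × Nat) Int) j =>
        let r := solveB cs n acc2.2 i j
        (acc2.1 ++ [r.1], r.2)) (row0, memo)).2 := by
  intro T
  induction T with
  | zero => intro _ row0 memo hInv; exact ⟨by simp, hInv⟩
  | succ T ihT =>
    intro hT row0 memo hInv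
    rw [List.range_succ, List.foldl_append, List.map_append]
    obtain ⟨e1, hI1⟩ := ihT (by omega) row0 memo hInv
    simp only [List.foldl_cons, List.foldl_nil]
    set st := ((List.range T).foldl (fun (acc2 : List Int × PySem.Dict (Nat × Nat) Int) j =>
        let r := solveB cs n acc2.2 i j
        (acc2.1 ++ [r.1], r.2)) (row0, memo)) with hst
    obtain ⟨s1, s2⟩ := solveB_correct cs n st.2 i T hI1 (by omega)
    constructor
    · show st.1 ++ [(solveB cs n st.2 i T).1] = row0 ++ ((List.range T).map _ ++ _)
      rw [e1, s1, List.append_assoc]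
      rfl
    · exact s2

theorem portB_eval (sequence : String) :
    nussinov_jacobson_dna_alt sequence
      = (matF sequence.toList.length (fun a b => Nv sequence.toList a b), sequence) := by
  have hdef : nussinov_jacobson_dna_alt sequence =
      (((List.range sequence.toList.length).foldl
        (fun (acc : List (List Int) × PySem.Dict (Nat × Nat) Int) i =>
          let rm := (List.range sequence.toList.length).foldl
            (fun (acc2 : List Int × PySem.Dict (Nat × Nat) Int) j =>
              let r := solveB sequence.toList sequence.toList.length acc2.2 i j
              (acc2.1 ++ [r.1], r.2)) ([], acc.2)
          (acc.1 ++ [rm.1], rm.2)) ([], PySem.Dict.empty)).1, sequence) := rfl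
  rw [hdef]
  have main : ∀ (M : Nat), M ≤ sequence.toList.length →
      ∀ (rows0 : List (List Int)) (memo : PySem.Dict (Nat × Nat) Int),
        InvM sequence.toList memo →
      ((List.range M).foldl
        (fun (acc : List (List Int) × PySem.Dict (Nat × Nat) Int) i =>
          let rm := (List.range sequence.toList.length).foldl
            (fun (acc2 : List Int × PySem.Dict (Nat × Nat) Int) j =>
              let r := solveB sequence.toList sequence.toList.length acc2.2 i j
              (acc2.1 ++ [r.1], r.2)) ([], acc.2)
          (acc.1 ++ [rm.1], rm.2)) (rows0, memo)).1
        = rows0 ++ (List.range M).map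
            (fun i => (List.range sequence.toList.length).map (fun j => Nv sequence.toList i j))
      ∧ InvM sequence.toList ((List.range M).foldl
        (fun (acc : List (List Int) × PySem.Dict (Nat × Nat) Int) i =>
          let rm := (List.range sequence.toList.length).foldl
            (fun (acc2 : List Int × PySem.Dict (Nat × Nat) Int) j =>
              let r := solveB sequence.toList sequence.toList.length acc2.2 i j
              (acc2.1 ++ [r.1], r.2)) ([], acc.2)
          (acc.1 ++ [rm.1], rm.2)) (rows0, memo)).2 := by
    intro M
    induction M with
    | zero => intro _ rows0 memo hInv; exact ⟨by simp, hInv⟩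
    | succ M ihM =>
      intro hM rows0 memo hInv
      rw [List.range_succ, List.foldl_append, List.map_append]
      obtain ⟨e1, hI1⟩ := ihM (by omega) rows0 memo hInv
      simp only [List.foldl_cons, List.foldl_nil]
      set st := ((List.range M).foldl
        (fun (acc : List (List Int) × PySem.Dict (Nat × Nat) Int) i =>
          let rm := (List.range sequence.toList.length).foldl
            (fun (acc2 : List Int × PySem.Dict (Nat × Nat) Int) j =>
              let r := solveB sequence.toList sequence.toList.length acc2.2 i j
              (acc2.1 ++ [r.1], r.2)) ([], acc.2)
          (acc.1 ++ [rm.1], rm.2)) (rows0, memo)) with hst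
      obtain ⟨r1, r2⟩ := rowB sequence.toList sequence.toList.length M
        sequence.toList.length (le_refl _) [] st.2 hI1
      constructor
      · show st.1 ++ [((List.range sequence.toList.length).foldl _ ([], st.2)).1]
            = rows0 ++ ((List.range M).map _ ++ _)
        rw [e1, r1, List.append_assoc]
        rfl
      · exact r2
  obtain ⟨hmain, _⟩ := main sequence.toList.length (le_refl _) [] PySem.Dict.empty
    (InvM_empty sequence.toList)
  rw [hmain]
  unfold matF
  rw [List.nil_append]

-- ===== VERDICT (by name: the statement is the Claim_ definition above) =====
theorem nussinov_jacobson_dna_spec : Claim_equal_nussinov_jacobson_dna := by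
  intro sequence _
  unfold Spec_nussinov_jacobson_dna
  rw [portA_eval, portB_eval]
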